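-- pv_equiv track=rewrite | github.com/w402116500/workflow_bundle | tools/core/code_evidence.py | _template_range
-- ===== SOURCE A (Python) =====
-- def _template_range(lines: list[str]) -> tuple[int, int] | None:
--     start = None
--     for idx, line in enumerate(lines):
--         if "<template" in line:
--             start = idx
--             break
--     if start is None:
--         return None
--     for idx in range(start + 1, len(lines)):
--         if "</template>" in lines[idx]:
--             return start, idx
--     return None
-- ===== SOURCE B (Python) =====
-- def _template_range(lines: list[str]) -> tuple[int, int] | None:
--     # Reverse pass: close_after holds the smallest index > current position
--     # whose line contains "</template>"; each open line overwrites result,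
--     # so the final result corresponds to the first open line.
--     result = None
--     close_after = None
--     for idx, line in reversed(list(enumerate(lines))):
--         if "<template" in line:
--             result = (idx, close_after) if close_after is not None else None
--         if "</template>" in line:
--             close_after = idx
--     return result
-- ===== Notes on version B (the rewrite author's own statement) =====
-- stated objective: alternative
-- what changed: Replaces A's forward two-stage scan (find first open line, then scan forward for the close) with a single reverse pass that carries the earliest close index seen so far and records a candidate pair at every open line, so the last candidate written belongs to the first open line.
import Mathlib
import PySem

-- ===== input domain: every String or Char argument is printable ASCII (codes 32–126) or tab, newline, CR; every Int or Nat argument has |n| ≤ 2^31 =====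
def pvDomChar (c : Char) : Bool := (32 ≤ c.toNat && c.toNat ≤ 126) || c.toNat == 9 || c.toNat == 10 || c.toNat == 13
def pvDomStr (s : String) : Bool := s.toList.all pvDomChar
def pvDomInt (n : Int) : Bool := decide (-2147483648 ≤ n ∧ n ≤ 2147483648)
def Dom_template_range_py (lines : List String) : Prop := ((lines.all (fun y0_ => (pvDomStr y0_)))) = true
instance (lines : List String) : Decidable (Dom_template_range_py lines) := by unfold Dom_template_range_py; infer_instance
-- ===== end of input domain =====

-- B replaces A's forward two-stage scan with a single reverse pass carrying the earliest
-- close index seen so far; same O(n) cost, different traversal (alternative algorithm).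

-- ===== PORT A =====
-- first loop: 'for idx, line in enumerate(lines): if "<template" in line: start = idx; break'
def pvFindOpenA : List (Int × String) → Option Int
  | [] => none
  | (i, l) :: rest => if PySem.Str.isIn "<template" l then some i else pvFindOpenA rest

-- second loop: 'for idx in range(start + 1, len(lines)): if "</template>" in lines[idx]: return start, idx'
def pvFindCloseA (lines : List String) (start : Int) : List Int → Option (Int × Int)
  | [] => none
  | i :: rest =>
    if PySem.Str.isIn "</template>" (PySem.List.pyGetD lines i "") then some (start, i)
    else pvFindCloseA lines start rest

def template_range_py (lines : List String) : Option (Int × Int) :=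
  match pvFindOpenA (PySem.List.enumerate lines 0) with
  | none => none
  | some start => pvFindCloseA lines start (PySem.List.pyRange (start + 1) (PySem.List.len lines) 1)

-- ===== PORT B =====
-- 'for idx, line in reversed(list(enumerate(lines))): …' with state (result, close_after)
def pvRevB : List (Int × String) → Option (Int × Int) × Option Int → Option (Int × Int) × Option Int
  | [], st => st
  | (i, l) :: rest, (res, ca) =>
    let res' := if PySem.Str.isIn "<template" l then
                  (match ca with | some c => some (i, c) | none => none)
                else res
    let ca' := if PySem.Str.isIn "</template>" l then some i else ca
    pvRevB rest (res', ca')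

def template_range_py_alt (lines : List String) : Option (Int × Int) :=
  (pvRevB (PySem.List.enumerate lines 0).reverse (none, none)).1

-- ===== PRECONDITION & SPEC =====
def Spec_template_range_py (lines : List String) (out : Option (Int × Int)) : Prop := out = template_range_py_alt lines
instance (lines : List String) (out : Option (Int × Int)) : Decidable (Spec_template_range_py lines out) := by unfold Spec_template_range_py; infer_instance

-- ===== CLAIM (what is proved, stated in full; the proofs are below) =====
def Claim_equal_template_range_py : Prop := ∀ (lines : List String), Dom_template_range_py lines → Spec_template_range_py lines (template_range_py lines)

-- ===== LEMMAS AND PROOFS =====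

-- proof-side specification: first close index in an enumerated list
def pvFcSpec : List (Int × String) → Option Int
  | [] => none
  | (i, l) :: rest => if PySem.Str.isIn "</template>" l then some i else pvFcSpec rest

-- proof-side specification: the answer on an enumerated list (first open, then first later close)
def pvAnsSpec : List (Int × String) → Option (Int × Int)
  | [] => none
  | (i, l) :: rest =>
    if PySem.Str.isIn "<template" l then
      (match pvFcSpec rest with | some c => some (i, c) | none => none)
    else pvAnsSpec rest

-- bridge between A's two-stage form and the spec: a forward stateful scan
def pvScanFwd : List (Int × String) → Option Int → Option (Int × Int)
  | [], _ => none
  | (i, l) :: rest, none => pvScanFwd rest (if PySem.Str.isIn "<template" l then some i else none)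
  | (i, l) :: rest, some s =>
    if PySem.Str.isIn "</template>" l then some (s, i) else pvScanFwd rest (some s)

lemma pvRevB_append : ∀ (l1 l2 : List (Int × String)) (st : Option (Int × Int) × Option Int),
    pvRevB (l1 ++ l2) st = pvRevB l2 (pvRevB l1 st) := by
  intro l1
  induction l1 with
  | nil => intro l2 st; rfl
  | cons x xs ih =>
    intro l2 st
    obtain ⟨i, l⟩ := x; obtain ⟨res, ca⟩ := st
    simp only [List.cons_append, pvRevB]
    exact ih l2 _

-- the reverse pass computes (answer, first close) of the enumerated list
lemma pvRevB_reverse : ∀ (es : List (Int × String)),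
    pvRevB es.reverse (none, none) = (pvAnsSpec es, pvFcSpec es) := by
  intro es
  induction es with
  | nil => rfl
  | cons x xs ih =>
    obtain ⟨i, l⟩ := x
    rw [List.reverse_cons, pvRevB_append, ih]
    simp only [pvRevB, pvAnsSpec, pvFcSpec]

lemma pvScanFwd_some : ∀ (es : List (Int × String)) (s : Int),
    pvScanFwd es (some s) = (match pvFcSpec es with | some c => some (s, c) | none => none) := by
  intro es
  induction es with
  | nil => intro s; rfl
  | cons x xs ih =>
    intro s; obtain ⟨i, l⟩ := x
    simp only [pvScanFwd, pvFcSpec]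
    split_ifs with hc <;> simp [ih]

lemma pvScanFwd_none : ∀ (es : List (Int × String)),
    pvScanFwd es none = pvAnsSpec es := by
  intro es
  induction es with
  | nil => rfl
  | cons x xs ih =>
    obtain ⟨i, l⟩ := x
    simp only [pvScanFwd, pvAnsSpec]
    split_ifs with ho
    · simp [pvScanFwd_some]
    · simp [ih]

-- A's index loop from m agrees with the forward scan's close-seeking state over the matching suffix.
lemma pvClose_eq (all : List String) (start : Int) :
    ∀ (rest : List String) (m : Nat), all.drop m = rest →
      pvFindCloseA all start (PySem.List.pyRange (m : Int) (PySem.List.len all) 1)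
        = pvScanFwd (PySem.List.enumerate rest (m : Int)) (some start) := by
  intro rest
  induction rest with
  | nil =>
    intro m hdrop
    have hm : all.length ≤ m := by
      by_contra h
      have := List.drop_eq_nil_iff.mp hdrop
      omega
    rw [PySem.List.pyRange_one_eq_nil (by simp [PySem.List.len_eq]; exact_mod_cast hm)]
    simp [pvFindCloseA, PySem.List.enumerate_nil, pvScanFwd]
  | cons l rest ih =>
    intro m hdrop
    have hm : m < all.length := by
      by_contra h
      rw [List.drop_eq_nil_iff.mpr (by omega)] at hdrop
      simp at hdrop
    have hget : all[m]'hm = l := by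
      have h0 : (all.drop m)[0]'(by simp [hdrop]) = l := by simp [hdrop]
      simpa [List.getElem_drop] using h0
    rw [PySem.List.pyRange_one_cons (by simp [PySem.List.len_eq]; exact_mod_cast hm)]
    rw [PySem.List.enumerate_cons]
    have hgd : PySem.List.pyGetD all (m : Int) "" = l := by
      rw [PySem.List.pyGetD_natCast]
      simp [List.getD, hget, hm]
    simp only [pvFindCloseA, pvScanFwd, hgd]
    split_ifs with hc
    · rfl
    · have hdrop' : all.drop (m + 1) = rest := by
        have : (all.drop m).drop 1 = rest := by simp [hdrop]
        simpa [List.drop_drop, Nat.add_comm] using this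
      have := ih (m + 1) hdrop'
      push_cast at this ⊢
      exact this

-- A's composite equals the forward scan on any suffix.
lemma pvMain (all : List String) :
    ∀ (rest : List String) (m : Nat), all.drop m = rest →
      pvScanFwd (PySem.List.enumerate rest (m : Int)) none
        = (match pvFindOpenA (PySem.List.enumerate rest (m : Int)) with
           | none => none
           | some s => pvFindCloseA all s (PySem.List.pyRange (s + 1) (PySem.List.len all) 1)) := by
  intro rest
  induction rest with
  | nil => intro m _; simp [PySem.List.enumerate_nil, pvScanFwd, pvFindOpenA]
  | cons l rest ih =>
    intro m hdrop
    have hdrop' : all.drop (m + 1) = rest := by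
      have : (all.drop m).drop 1 = rest := by simp [hdrop]
      simpa [List.drop_drop, Nat.add_comm] using this
    rw [PySem.List.enumerate_cons]
    by_cases ho : PySem.Str.isIn "<template" l
    · simp only [pvScanFwd, pvFindOpenA, ho, if_true]
      have := pvClose_eq all (m : Int) rest (m + 1) hdrop'
      push_cast at this ⊢
      exact this.symm
    · simp only [pvScanFwd, pvFindOpenA, ho, Bool.false_eq_true, if_false]
      have := ih (m + 1) hdrop'
      push_cast at this ⊢
      exact this

-- ===== VERDICT (by name: the statement is the Claim_ definition above) =====
theorem template_range_py_spec : Claim_equal_template_range_py := by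
  intro lines _
  unfold Spec_template_range_py template_range_py template_range_py_alt
  have hA := pvMain lines lines 0 (by simp)
  push_cast at hA
  rw [← hA, pvScanFwd_none, pvRevB_reverse]
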